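-- pv_equiv track=rewrite | github.com/Longchanging/New-MagPrint | New-MagPrint/src/collect_data.py | new_raw_data_process
-- ===== SOURCE A (Python) =====
-- def new_raw_data_process(content):
--     '''
--         Process Raw Sensor Data Following Collector Logistics
--     '''
--     one_package_data = []
--     for i in range(6, len(content) - 4):
--         if i % 2 == 0:
--             prior_byte = content[i]
--         else:
--             second_byte = content[i]
--             num = (prior_byte << 8) | (second_byte)
--             if num > 2 ** 15:
--                 num -= 2 ** 16
--             one_package_data.append(num)
--         i += 1
--     return one_package_data
-- ===== SOURCE B (Python) =====
-- def new_raw_data_process(content):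
--     '''
--         Process Raw Sensor Data Following Collector Logistics
--     '''
--     stop = len(content) - 4
--     out = []
--     for i in range(7, stop, 2):
--         num = (content[i - 1] << 8) | content[i]
--         out.append(num - 2 ** 16 if num > 2 ** 15 else num)
--     return out
-- ===== Notes on version B (the rewrite author's own statement) =====
-- stated objective: simpler
-- what changed: Replaced the single-index parity state machine (prior_byte carried across iterations with an even/odd branch) by a direct step-2 loop over the odd indices that reads each byte pair at (i-1, i) in one expression.
import Mathlib
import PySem

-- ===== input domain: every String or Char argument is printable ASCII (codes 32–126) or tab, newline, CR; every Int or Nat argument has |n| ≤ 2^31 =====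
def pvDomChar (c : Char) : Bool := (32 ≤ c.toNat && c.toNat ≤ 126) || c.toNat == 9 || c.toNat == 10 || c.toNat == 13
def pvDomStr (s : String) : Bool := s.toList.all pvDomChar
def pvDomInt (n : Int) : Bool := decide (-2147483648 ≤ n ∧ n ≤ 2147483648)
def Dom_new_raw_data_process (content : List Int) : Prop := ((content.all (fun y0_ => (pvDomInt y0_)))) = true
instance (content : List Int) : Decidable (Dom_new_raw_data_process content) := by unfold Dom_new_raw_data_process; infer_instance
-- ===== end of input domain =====

-- B replaces A's parity state machine (prior_byte carried across iterations) by a direct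
-- step-2 loop over the odd indices, reading each byte pair at (i-1, i); objective: simpler.

-- ===== PORT A =====
-- loop body of A: state = (prior_byte, one_package_data); prior_byte starts as 0, a stand-in
-- for Python's "unbound" prior_byte — it is never read before being set, since the range
-- starts at the even index 6.  Indices drawn from the range are always in bounds, so
-- pyGetD's default 0 is never used either.
def pvStepA (content : List Int) (st : Int × List Int) (i : Int) : Int × List Int :=
  if PySem.Int.mod i 2 = 0 then
    (PySem.List.pyGetD content i 0, st.2)
  else
    let num := PySem.Int.bor (st.1 <<< (8 : Nat)) (PySem.List.pyGetD content i 0)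
    (st.1, st.2 ++ [if num > 2 ^ 15 then num - 2 ^ 16 else num])

def new_raw_data_process (content : List Int) : List Int :=
  ((PySem.List.pyRange 6 ((content.length : Int) - 4) 1).foldl (pvStepA content) (0, [])).2

-- ===== PORT B =====
-- the pair value of Source B's loop body at odd index i
def pvPairB (content : List Int) (i : Int) : Int :=
  let num := PySem.Int.bor ((PySem.List.pyGetD content (i - 1) 0) <<< (8 : Nat))
                           (PySem.List.pyGetD content i 0)
  if num > 2 ^ 15 then num - 2 ^ 16 else num

def new_raw_data_process_alt (content : List Int) : List Int :=
  (PySem.List.pyRange 7 ((content.length : Int) - 4) 2).foldl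
    (fun acc i => acc ++ [pvPairB content i]) []

-- ===== PRECONDITION & SPEC =====
def Spec_new_raw_data_process (content : List Int) (out : List Int) : Prop := out = new_raw_data_process_alt content
instance (content : List Int) (out : List Int) : Decidable (Spec_new_raw_data_process content out) := by unfold Spec_new_raw_data_process; infer_instance

-- ===== CLAIM (what is proved, stated in full; the proofs are below) =====
def Claim_equal_new_raw_data_process : Prop := ∀ (content : List Int), Dom_new_raw_data_process content → Spec_new_raw_data_process content (new_raw_data_process content)

-- ===== LEMMAS AND PROOFS =====

-- step-2 range: empty case
lemma pyRange_two_eq_nil {a b : Int} (h : b ≤ a) : PySem.List.pyRange a b 2 = [] := by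
  rw [PySem.List.pyRange_of_pos a b (by norm_num)]
  simp [if_neg (not_lt.mpr h)]

-- step-2 range: cons case
lemma pyRange_two_cons {a b : Int} (h : a < b) :
    PySem.List.pyRange a b 2 = a :: PySem.List.pyRange (a + 2) b 2 := by
  rw [PySem.List.pyRange_of_pos a b (by norm_num),
      PySem.List.pyRange_of_pos (a + 2) b (by norm_num)]
  have hcount : (if a < b then ((b - a + 2 - 1) / 2).toNat else 0)
      = (if a + 2 < b then ((b - (a + 2) + 2 - 1) / 2).toNat else 0) + 1 := by
    rw [if_pos h]
    by_cases h2 : a + 2 < b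
    · rw [if_pos h2]
      omega
    · rw [if_neg h2]
      omega
  rw [hcount, List.range_succ_eq_map]
  simp only [List.map_cons, List.map_map]
  congr 1
  · push_cast; ring
  · apply List.map_congr_left
    intro k _
    simp only [Function.comp_apply]
    push_cast
    ring

-- main loop invariant: starting A's loop at an even index a with any carried prior byte
-- produces exactly the pair values of the odd indices a+1, a+3, … below b
lemma loopA_eq (content : List Int) :
    ∀ (n : Nat) (a b p : Int) (acc : List Int), 2 ∣ a → b - a ≤ n →
      ((PySem.List.pyRange a b 1).foldl (pvStepA content) (p, acc)).2
        = acc ++ (PySem.List.pyRange (a + 1) b 2).map (pvPairB content) := by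
  intro n
  induction n with
  | zero =>
    intro a b p acc _ hba
    rw [PySem.List.pyRange_one_eq_nil (by omega), pyRange_two_eq_nil (by omega)]
    simp
  | succ m ih =>
    intro a b p acc hpar hba
    by_cases hab : a < b
    · rw [PySem.List.pyRange_one_cons hab]
      simp only [List.foldl_cons]
      have heva : pvStepA content (p, acc) a = (PySem.List.pyGetD content a 0, acc) := by
        have hm : PySem.Int.mod a 2 = 0 := by
          unfold PySem.Int.mod
          rw [Int.fmod_eq_emod]
          simp
          omega
        simp only [pvStepA, if_pos hm]
      rw [heva]
      by_cases hab1 : a + 1 < b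
      · rw [PySem.List.pyRange_one_cons hab1]
        simp only [List.foldl_cons]
        have hodd : pvStepA content (PySem.List.pyGetD content a 0, acc) (a + 1)
            = (PySem.List.pyGetD content a 0, acc ++ [pvPairB content (a + 1)]) := by
          have hm : ¬ PySem.Int.mod (a + 1) 2 = 0 := by
            unfold PySem.Int.mod
            rw [Int.fmod_eq_emod]
            simp
            omega
          simp only [pvStepA, if_neg hm, pvPairB, add_sub_cancel_right]
        rw [hodd, show a + 1 + 1 = a + 2 by ring, ih (a + 2) b (PySem.List.pyGetD content a 0)
              (acc ++ [pvPairB content (a + 1)]) (by omega) (by omega)]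
        rw [pyRange_two_cons hab1]
        have : a + 1 + 2 = a + 2 + 1 := by ring
        simp [this]
      · rw [PySem.List.pyRange_one_eq_nil (by omega), pyRange_two_eq_nil (by omega)]
        simp
    · rw [PySem.List.pyRange_one_eq_nil (by omega), pyRange_two_eq_nil (by omega)]
      simp

-- ===== VERDICT (by name: the statement is the Claim_ definition above) =====
theorem new_raw_data_process_spec : Claim_equal_new_raw_data_process := by
  intro content _
  unfold Spec_new_raw_data_process new_raw_data_process new_raw_data_process_alt
  rw [loopA_eq content ((content.length : Int) - 6 + 2).toNat 6 ((content.length : Int) - 4) 0 []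
        (by norm_num) (by omega)]
  rw [PySem.List.foldl_append_singleton_eq_map]
  norm_num
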